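-- pv_equiv track=rewrite | github.com/a-gavriel/Python-Games | Clases/Clases-Ejecicios/Soluciones/6a.py | muestreMAux
-- ===== SOURCE A (Python) =====
-- def muestreMAux(resultado,M,filas,cols, i, j):
--     if i == filas: #Ya se recorrieron todas las filas
--         return resultado
--     elif j == cols: #Ya se recorrió una fila
--         resultado += "\n"
--         return muestreMAux(resultado,M,filas, cols, i+1, 0) # Se pasa a la próxima fila
--     else:
--         elemento = M[i][j]  #Elemento (i,j) de la matriz
--         resultado += str(elemento) + " "
--         return muestreMAux(resultado,M,filas, cols, i, j+1 ) #Se pasa al siguiente elemento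
-- ===== SOURCE B (Python) =====
-- def muestreMAux(resultado, M, filas, cols, i, j):
--     if i == filas:
--         return resultado
--     first = "".join(str(M[i][k]) + " " for k in range(j, cols)) + "\n"
--     rest = "".join(
--         "".join(str(M[r][k]) + " " for k in range(cols)) + "\n"
--         for r in range(i + 1, filas)
--     )
--     return resultado + first + rest
-- ===== Notes on version B (the rewrite author's own statement) =====
-- stated objective: idiomatic
-- what changed: Replaces the one-cell-per-call tail recursion with a direct non-recursive construction: a join over range(j,cols) for the first (partial) row and a nested join over range(i+1,filas) for the remaining rows, reading each cell M[r][k] lazily exactly as A does, avoiding CPython recursion depth limits.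
import Mathlib
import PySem

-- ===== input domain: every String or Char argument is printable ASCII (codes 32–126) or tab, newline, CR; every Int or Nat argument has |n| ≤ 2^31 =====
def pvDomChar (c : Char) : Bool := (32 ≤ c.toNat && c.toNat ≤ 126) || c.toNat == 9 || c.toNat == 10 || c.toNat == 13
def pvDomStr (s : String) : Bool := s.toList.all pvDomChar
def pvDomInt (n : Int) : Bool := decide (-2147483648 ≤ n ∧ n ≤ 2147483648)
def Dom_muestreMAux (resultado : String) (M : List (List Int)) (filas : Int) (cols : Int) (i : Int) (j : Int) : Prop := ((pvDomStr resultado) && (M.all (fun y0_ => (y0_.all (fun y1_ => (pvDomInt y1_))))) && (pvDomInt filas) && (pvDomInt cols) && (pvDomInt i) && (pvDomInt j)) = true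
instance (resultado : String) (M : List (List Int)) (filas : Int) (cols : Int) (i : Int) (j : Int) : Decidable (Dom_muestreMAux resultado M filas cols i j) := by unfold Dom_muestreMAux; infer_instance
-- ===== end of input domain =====

-- B replaces A's one-cell-per-call tail recursion by a direct non-recursive construction
-- (a join over the first partial row, then a nested join over the remaining full rows),
-- reading each cell M[r][k] lazily exactly where A reads it.

-- ===== PORT A =====
-- Literal port of A's tail recursion. The extra Nat fuel argument is only a totality
-- guard (A's recursion is unbounded when the cursor is past filas/cols; those inputs
-- are excluded by Pre_muestreMAux, inside which the supplied fuel is proved sufficient);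
-- the branch order and the accumulator are A's.
def muestreMAuxFuel (M : List (List Int)) (filas : Int) (cols : Int) : Nat → String → Int → Int → String
  | 0, resultado, _, _ => resultado        -- fuel exhausted: unreachable inside Pre_muestreMAux
  | fuel + 1, resultado, i, j =>
    if i = filas then resultado
    else if j = cols then
      muestreMAuxFuel M filas cols fuel (resultado ++ "\n") (i + 1) 0
    else
      match PySem.List.pyGet? M i with
      | none => resultado                  -- Python raises IndexError here
      | some row =>
        match PySem.List.pyGet? row j with
        | none => resultado                -- Python raises IndexError here
        | some elemento =>
          muestreMAuxFuel M filas cols fuel (resultado ++ (PySem.Int.toStr elemento ++ " ")) i (j + 1)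

def muestreMAux (resultado : String) (M : List (List Int)) (filas : Int) (cols : Int) (i : Int) (j : Int) : String :=
  muestreMAuxFuel M filas cols (((filas - i).toNat + 1) * (cols.toNat + 1) + (cols - j).toNat + 1) resultado i j

-- ===== PORT B =====
-- ''.join of a generator in Source B, ported as a recursive empty-separator join.
def pvJoin : List String → String
  | [] => ""
  | s :: rest => s ++ pvJoin rest

-- str(M[i][k]) + " " in Source B (lazy double index; the defaults are unreachable inside Pre_)
def pvCellStr (M : List (List Int)) (i k : Int) : String :=
  PySem.Int.toStr ((PySem.List.pyGet? ((PySem.List.pyGet? M i).getD []) k).getD 0) ++ " "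

-- "".join(str(M[i][k]) + " " for k in range(a, b))   (the inner generator of Source B)
def pvRowStr (M : List (List Int)) (i a b : Int) : String :=
  pvJoin ((PySem.List.pyRange a b 1).map (fun k => pvCellStr M i k))

-- the outer generator of Source B over rows range(a, b)
def pvRestStr (M : List (List Int)) (a b cols : Int) : String :=
  pvJoin ((PySem.List.pyRange a b 1).map (fun r => pvRowStr M r 0 cols ++ "\n"))

def muestreMAux_alt (resultado : String) (M : List (List Int)) (filas : Int) (cols : Int) (i : Int) (j : Int) : String :=
  if i = filas then resultado
  else
    let first := pvRowStr M i j cols ++ "\n"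
    let rest := pvRestStr M (i + 1) filas cols
    resultado ++ first ++ rest

-- ===== PRECONDITION & SPEC =====
-- Pre_ is exactly A's normal-return condition: it excludes only inputs on which A raises
-- (IndexError on an out-of-range cell the recursion reads) or recurses without bound
-- (RecursionError: a cursor beyond filas/cols, or a too-short row the recursion would
-- visit). B returns A's value on every admitted input; nothing A returns on is excluded.
def Pre_muestreMAux (_resultado : String) (M : List (List Int)) (filas : Int) (cols : Int) (i : Int) (j : Int) : Prop :=
  i = filas ∨
    (i < filas ∧ j ≤ cols ∧ (0 ≤ cols ∨ i + 1 = filas) ∧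
      (j < cols →
        PySem.Raise.InRange M.length i ∧
        -((((PySem.List.pyGet? M i).getD []).length : Int)) ≤ j ∧
        cols ≤ (((PySem.List.pyGet? M i).getD []).length : Int)) ∧
      (filas ≤ i + 1 ∨ cols ≤ 0 ∨
        (-((M.length : Int)) ≤ i + 1 ∧ filas ≤ (M.length : Int) ∧
          ∀ p ∈ M.zipIdx,
            ((i + 1 ≤ (p.2 : Int) ∧ (p.2 : Int) < filas) ∨
              (i + 1 ≤ (p.2 : Int) - M.length ∧ (p.2 : Int) - M.length < filas)) →
            cols ≤ ((p.1.length : Int)))))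
instance (resultado : String) (M : List (List Int)) (filas : Int) (cols : Int) (i : Int) (j : Int) : Decidable (Pre_muestreMAux resultado M filas cols i j) := by unfold Pre_muestreMAux; infer_instance

def pvWitness_muestreMAux : String × List (List Int) × Int × Int × Int × Int :=
  ("", [[1, 2], [3, 4]], 2, 2, 0, 0)

def Spec_muestreMAux (resultado : String) (M : List (List Int)) (filas : Int) (cols : Int) (i : Int) (j : Int) (out : String) : Prop := out = muestreMAux_alt resultado M filas cols i j
instance (resultado : String) (M : List (List Int)) (filas : Int) (cols : Int) (i : Int) (j : Int) (out : String) : Decidable (Spec_muestreMAux resultado M filas cols i j out) := by unfold Spec_muestreMAux; infer_instance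

-- ===== CLAIM (what is proved, stated in full; the proofs are below) =====
def Claim_equal_muestreMAux : Prop := ∀ (resultado : String) (M : List (List Int)) (filas : Int) (cols : Int) (i : Int) (j : Int), Dom_muestreMAux resultado M filas cols i j → Pre_muestreMAux resultado M filas cols i j → Spec_muestreMAux resultado M filas cols i j (muestreMAux resultado M filas cols i j)

-- ===== LEMMAS AND PROOFS =====

theorem pvRowStr_nil (M : List (List Int)) (i a b : Int) (h : b ≤ a) :
    pvRowStr M i a b = "" := by
  simp [pvRowStr, PySem.List.pyRange_one_eq_nil h, pvJoin]

theorem pvRowStr_cons (M : List (List Int)) (i a b : Int) (h : a < b) :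
    pvRowStr M i a b = pvCellStr M i a ++ pvRowStr M i (a + 1) b := by
  simp [pvRowStr, PySem.List.pyRange_one_cons h, pvJoin]

theorem pvRestStr_nil (M : List (List Int)) (a b cols : Int) (h : b ≤ a) :
    pvRestStr M a b cols = "" := by
  simp [pvRestStr, PySem.List.pyRange_one_eq_nil h, pvJoin]

theorem pvRestStr_cons (M : List (List Int)) (a b cols : Int) (h : a < b) :
    pvRestStr M a b cols = (pvRowStr M a 0 cols ++ "\n") ++ pvRestStr M (a + 1) b cols := by
  simp [pvRestStr, PySem.List.pyRange_one_cons h, pvJoin]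

-- alt absorbs one cell into the accumulator
theorem alt_step_cell (resultado : String) (M : List (List Int)) (filas cols i j : Int)
    (hne : i ≠ filas) (hj : j < cols) :
    muestreMAux_alt resultado M filas cols i j =
      muestreMAux_alt (resultado ++ pvCellStr M i j) M filas cols i (j + 1) := by
  simp only [muestreMAux_alt, if_neg hne]
  rw [pvRowStr_cons _ _ _ _ hj]
  simp [String.append_assoc]

-- alt absorbs a row end into the accumulator
theorem alt_step_row (resultado : String) (M : List (List Int)) (filas cols i : Int)
    (hi : i < filas) :
    muestreMAux_alt resultado M filas cols i cols =
      muestreMAux_alt (resultado ++ "\n") M filas cols (i + 1) 0 := by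
  by_cases hend : i + 1 = filas
  · simp only [muestreMAux_alt, if_neg (by omega : ¬ i = filas), if_pos hend]
    rw [pvRowStr_nil _ _ _ _ le_rfl, pvRestStr_nil _ _ _ _ (by omega)]
    simp
  · simp only [muestreMAux_alt, if_neg (by omega : ¬ i = filas), if_neg hend]
    rw [pvRowStr_nil _ _ _ _ le_rfl, pvRestStr_cons _ _ _ _ (by omega : i + 1 < filas)]
    simp [String.append_assoc]

-- Loop invariant for the induction: like Pre_, but stated per visited index so it is
-- preserved by A's steps.
def pvInv (M : List (List Int)) (filas cols i j : Int) : Prop :=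
  i = filas ∨
    (i < filas ∧ j ≤ cols ∧ (0 ≤ cols ∨ i + 1 = filas) ∧
      (j < cols → PySem.Raise.InRange M.length i) ∧
      (∀ k ∈ PySem.List.pyRange j cols 1,
        PySem.Raise.InRange ((PySem.List.pyGet? M i).getD []).length k) ∧
      (∀ r ∈ PySem.List.pyRange (i + 1) filas 1, 0 < cols →
        PySem.Raise.InRange M.length r ∧
        ∀ k ∈ PySem.List.pyRange 0 cols 1,
          PySem.Raise.InRange ((PySem.List.pyGet? M r).getD []).length k))

-- steps remaining from cursor (i, j); each recursive call of A consumes exactly one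
def pvMeasure (filas cols i j : Int) : Nat :=
  if i = filas then 0
  else (filas - i).toNat * (cols.toNat + 1) + (cols - j).toNat + 1

theorem muestreMAux_eq_alt (M : List (List Int)) (filas cols : Int) :
    ∀ (n : Nat) (resultado : String) (i j : Int), pvInv M filas cols i j →
      pvMeasure filas cols i j ≤ n →
      muestreMAuxFuel M filas cols n resultado i j = muestreMAux_alt resultado M filas cols i j := by
  intro n
  induction n with
  | zero =>
    intro resultado i j _ hm
    have hif : i = filas := by
      by_contra hne
      simp only [pvMeasure, if_neg hne] at hm
      omega
    simp [muestreMAuxFuel, muestreMAux_alt, hif]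
  | succ n ih =>
    intro resultado i j hinv hm
    by_cases hif : i = filas
    · simp [muestreMAuxFuel, muestreMAux_alt, hif]
    rcases hinv with h | ⟨h1, h2, h3, h4, h5, h6⟩
    · exact absurd h hif
    by_cases hjc : j = cols
    · -- row end: newline, move to the next row
      simp only [muestreMAuxFuel, if_neg hif, if_pos hjc]
      have hinv' : pvInv M filas cols (i + 1) 0 := by
        by_cases h : i + 1 = filas
        · exact Or.inl h
        · have hcols : 0 ≤ cols := by rcases h3 with h3 | h3 <;> omega
          have hmem : i + 1 ∈ PySem.List.pyRange (i + 1) filas 1 := by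
            rw [PySem.List.mem_pyRange_one]; omega
          refine Or.inr ⟨by omega, hcols, Or.inl hcols, ?_, ?_, ?_⟩
          · intro hc
            exact (h6 _ hmem (by omega)).1
          · intro k hk
            have hc : 0 < cols := by
              rw [PySem.List.mem_pyRange_one] at hk; omega
            exact (h6 _ hmem hc).2 k hk
          · intro r hr
            have : r ∈ PySem.List.pyRange (i + 1) filas 1 := by
              rw [PySem.List.mem_pyRange_one] at hr ⊢; omega
            exact h6 r this
      have hm' : pvMeasure filas cols (i + 1) 0 ≤ n := by
        by_cases h : i + 1 = filas
        · simp [pvMeasure, h]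
        · have hcols : 0 ≤ cols := by rcases h3 with h3 | h3 <;> omega
          simp only [pvMeasure, if_neg hif, if_neg h] at hm ⊢
          have ha : (filas - i).toNat = (filas - (i + 1)).toNat + 1 := by omega
          have hb : ((filas - (i + 1)).toNat + 1) * (cols.toNat + 1)
              = (filas - (i + 1)).toNat * (cols.toNat + 1) + (cols.toNat + 1) := by ring
          rw [ha, hb] at hm
          have hc0 : (cols - 0).toNat = cols.toNat := by omega
          have hcj : (cols - j).toNat = 0 := by omega
          omega
      rw [ih (resultado ++ "\n") (i + 1) 0 hinv' hm', hjc]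
      exact (alt_step_row resultado M filas cols i h1).symm
    · -- cell step: A reads M[i][j]
      have hjlt : j < cols := by omega
      obtain ⟨row, hrow⟩ : ∃ row, PySem.List.pyGet? M i = some row := by
        cases h : PySem.List.pyGet? M i with
        | none =>
          rw [PySem.List.pyGet?_eq_none_iff] at h
          exact absurd (h4 hjlt) h
        | some row => exact ⟨row, rfl⟩
      obtain ⟨elemento, helem⟩ : ∃ e, PySem.List.pyGet? row j = some e := by
        cases h : PySem.List.pyGet? row j with
        | none =>
          rw [PySem.List.pyGet?_eq_none_iff] at h
          have hjmem : j ∈ PySem.List.pyRange j cols 1 := by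
            rw [PySem.List.mem_pyRange_one]; omega
          have := h5 j hjmem
          rw [hrow] at this
          exact absurd this h
        | some e => exact ⟨e, rfl⟩
      simp only [muestreMAuxFuel, if_neg hif, if_neg hjc, hrow, helem]
      have hinv' : pvInv M filas cols i (j + 1) := by
        refine Or.inr ⟨h1, by omega, h3, fun hc => h4 (by omega), ?_, h6⟩
        intro k hk
        have : k ∈ PySem.List.pyRange j cols 1 := by
          rw [PySem.List.mem_pyRange_one] at hk ⊢; omega
        exact h5 k this
      have hm' : pvMeasure filas cols i (j + 1) ≤ n := by
        simp only [pvMeasure, if_neg hif] at hm ⊢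
        have : (cols - j).toNat = (cols - (j + 1)).toNat + 1 := by omega
        omega
      rw [ih (resultado ++ (PySem.Int.toStr elemento ++ " ")) i (j + 1) hinv' hm']
      have hval : pvCellStr M i j = PySem.Int.toStr elemento ++ " " := by
        simp [pvCellStr, hrow, helem]
      rw [← hval]
      exact (alt_step_cell resultado M filas cols i j hif hjlt).symm

-- the fuel muestreMAux supplies dominates the measure
theorem pvFuel_ge (filas cols i j : Int) :
    pvMeasure filas cols i j ≤ ((filas - i).toNat + 1) * (cols.toNat + 1) + (cols - j).toNat + 1 := by
  by_cases hif : i = filas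
  · simp [pvMeasure, hif]
  · simp only [pvMeasure, if_neg hif]
    have hb : ((filas - i).toNat + 1) * (cols.toNat + 1)
        = (filas - i).toNat * (cols.toNat + 1) + (cols.toNat + 1) := by ring
    omega

-- a row in the visited window [i+1, filas) (possibly via negative-index wraparound) is long enough
theorem pre_rest_rowlen (M : List (List Int)) (filas cols i r : Int)
    (hlo : -((M.length : Int)) ≤ i + 1) (hhi : filas ≤ (M.length : Int))
    (hall : ∀ p ∈ M.zipIdx,
      ((i + 1 ≤ (p.2 : Int) ∧ (p.2 : Int) < filas) ∨
        (i + 1 ≤ (p.2 : Int) - M.length ∧ (p.2 : Int) - M.length < filas)) →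
      cols ≤ ((p.1.length : Int)))
    (hr1 : i + 1 ≤ r) (hr2 : r < filas) :
    cols ≤ ((((PySem.List.pyGet? M r).getD []).length : Int)) := by
  by_cases hr0 : 0 ≤ r
  · have hn : r.toNat < M.length := by omega
    rw [PySem.List.pyGet?_of_nonneg (h := hr0), List.getElem?_eq_getElem hn]
    exact hall (M[r.toNat], r.toNat) (by rw [List.mk_mem_zipIdx_iff_getElem?, List.getElem?_eq_getElem hn]) (Or.inl (by omega))
  · have hk1 : 0 < (-r).toNat := by omega
    have hk2 : (-r).toNat ≤ M.length := by omega
    have hr' : r = -(((-r).toNat : Int)) := by omega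
    rw [hr', PySem.List.pyGet?_neg_natCast _ _ hk1 hk2]
    have hn : M.length - (-r).toNat < M.length := by omega
    rw [List.getElem?_eq_getElem hn]
    exact hall (M[M.length - (-r).toNat], M.length - (-r).toNat)
      (by rw [List.mk_mem_zipIdx_iff_getElem?, List.getElem?_eq_getElem hn]) (Or.inr (by omega))

theorem pre_imp_inv (resultado : String) (M : List (List Int)) (filas cols i j : Int)
    (hp : Pre_muestreMAux resultado M filas cols i j) : pvInv M filas cols i j := by
  rcases hp with h | ⟨h1, h2, h3, h4, h6⟩
  · exact Or.inl h
  refine Or.inr ⟨h1, h2, h3, fun hc => (h4 hc).1, ?_, ?_⟩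
  · intro k hk
    rw [PySem.List.mem_pyRange_one] at hk
    obtain ⟨-, hlo, hhi⟩ := h4 (by omega)
    constructor <;> omega
  · intro r hr hc
    rw [PySem.List.mem_pyRange_one] at hr
    rcases h6 with h6 | h6 | ⟨h6a, h6b, h6c⟩
    · omega
    · omega
    have hlen := pre_rest_rowlen M filas cols i r h6a h6b h6c (by omega) (by omega)
    refine ⟨by constructor <;> omega, ?_⟩
    intro k hk
    rw [PySem.List.mem_pyRange_one] at hk
    constructor <;> omega

-- ===== VERDICT (by name: the statement is the Claim_ definition above) =====
theorem muestreMAux_spec : Claim_equal_muestreMAux := by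
  intro resultado M filas cols i j _hdom hp
  exact muestreMAux_eq_alt M filas cols _ resultado i j
    (pre_imp_inv resultado M filas cols i j hp) (pvFuel_ge filas cols i j)
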